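-- pv_equiv track=rewrite | github.com/Wyss/storm-toehold | app.py | is_region_valid
-- ===== SOURCE A (Python) =====
-- def is_region_valid(seq):
--     if (len(seq) < 30):
--         return 0 # bad seq length
--     elif (seq[0] == '>'):
--         return 1 # fasta file
--     else:
--         valid_chars = ['A', 'U', 'T', 'C', 'G']
--         for char in seq:
--             if char not in valid_chars:
--                 return 2 # bad character composition
--         return 3 # all is fine
-- ===== SOURCE B (Python) =====
-- def is_region_valid(seq):
--     if len(seq) < 30:
--         return 0  # bad seq length
--     if seq[0] == '>':
--         return 1  # fasta file
--     # counting decomposition: the five allowed letters are distinct, so the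
--     # occurrence counts of A,U,T,C,G add up to len(seq) exactly when every
--     # character of seq is one of them
--     return 3 if sum(seq.count(c) for c in 'AUTCG') == len(seq) else 2
-- ===== Notes on version B (the rewrite author's own statement) =====
-- stated objective: alternative
-- what changed: A's per-character early-return membership loop is replaced by a counting argument: B counts the occurrences of each of the five allowed letters (five str.count scans) and declares the sequence valid exactly when those counts sum to len(seq).
import Mathlib
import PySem

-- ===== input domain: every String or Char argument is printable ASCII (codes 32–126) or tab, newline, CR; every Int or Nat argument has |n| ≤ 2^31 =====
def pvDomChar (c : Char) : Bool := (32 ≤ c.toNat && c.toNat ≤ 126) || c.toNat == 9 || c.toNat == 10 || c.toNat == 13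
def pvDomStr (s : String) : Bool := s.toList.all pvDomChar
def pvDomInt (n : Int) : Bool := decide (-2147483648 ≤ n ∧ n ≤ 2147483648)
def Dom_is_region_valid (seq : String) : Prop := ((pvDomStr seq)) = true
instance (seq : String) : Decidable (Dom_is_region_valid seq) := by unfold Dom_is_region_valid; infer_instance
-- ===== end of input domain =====

-- B replaces A's per-character membership loop by a counting decomposition: it
-- counts the occurrences of each of the five (distinct) allowed letters and
-- declares the sequence valid exactly when the counts sum to len(seq).

-- ===== PORT A =====
-- the for-loop over seq with early 'return 2'
def isRegionValidLoop : List Char → Int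
  | [] => 3
  | c :: rest =>
      if ¬ (c ∈ (['A', 'U', 'T', 'C', 'G'] : List Char)) then 2
      else isRegionValidLoop rest

def is_region_valid (seq : String) : Int :=
  if PySem.Str.len seq < 30 then 0
  else if PySem.Str.pyGet? seq 0 = some '>' then 1
  else isRegionValidLoop seq.toList

-- ===== PORT B =====
-- sum(seq.count(c) for c in 'AUTCG')
def isRegionValidCountSum (seq : String) : Int :=
  (("AUTCG".toList).map (fun c => (PySem.Str.count seq (String.ofList [c]) : Int))).sum

def is_region_valid_alt (seq : String) : Int :=
  if PySem.Str.len seq < 30 then 0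
  else if PySem.Str.pyGet? seq 0 = some '>' then 1
  else if isRegionValidCountSum seq = PySem.Str.len seq then 3 else 2

-- ===== PRECONDITION & SPEC =====
def Spec_is_region_valid (seq : String) (out : Int) : Prop := out = is_region_valid_alt seq
instance (seq : String) (out : Int) : Decidable (Spec_is_region_valid seq out) := by unfold Spec_is_region_valid; infer_instance

-- ===== CLAIM (what is proved, stated in full; the proofs are below) =====
def Claim_equal_is_region_valid : Prop := ∀ (seq : String), Dom_is_region_valid seq → Spec_is_region_valid seq (is_region_valid seq)

-- ===== LEMMAS AND PROOFS =====

-- Python str.count with a single-character needle is the element count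
theorem count_go_singleton (c : Char) :
    ∀ (fuel : Nat) (l : List Char) (acc : Nat), l.length ≤ fuel →
      PySem.Chars.count.go [c] fuel l acc = acc + l.count c := by
  intro fuel
  induction fuel with
  | zero =>
      intro l acc h
      have : l = [] := List.length_eq_zero_iff.mp (Nat.le_zero.mp h)
      subst this
      simp [PySem.Chars.count.go]
  | succ n ih =>
      intro l acc h
      cases l with
      | nil => simp [PySem.Chars.count.go]
      | cons x t =>
          simp only [PySem.Chars.count.go]
          by_cases hx : c = x
          · subst hx
            have : ([c].isPrefixOf (c :: t)) = true := by simp [List.isPrefixOf]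
            simp only [this, if_pos]
            have hlen : (List.drop 1 (c :: t)).length ≤ n := by simpa using Nat.lt_succ_iff.mp (Nat.lt_of_lt_of_le (Nat.lt_succ_self _) h)
            rw [show List.drop ([c].length) (c :: t) = t by simp]
            rw [ih t (acc + 1) (by simpa using h)]
            simp
            omega
          · have : ([c].isPrefixOf (x :: t)) = false := by
              simp [List.isPrefixOf, hx]
            simp only [this]
            simp only [Bool.false_eq_true, if_false]
            rw [ih t acc (by simpa using h)]
            simp [List.count_cons]
            intro hxc
            exact absurd hxc.symm hx

theorem chars_count_singleton (s : List Char) (c : Char) :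
    PySem.Chars.count s [c] = s.count c := by
  unfold PySem.Chars.count
  simp only [List.isEmpty]
  · exact (by simpa using count_go_singleton c s.length s 0 le_rfl)

-- the Nat-valued sum of the five letter counts
def natCountSum (l : List Char) : Nat :=
  (("AUTCG".toList).map (fun c => l.count c)).sum

theorem natCountSum_cons (c : Char) (l : List Char) :
    natCountSum (c :: l) = natCountSum l + (if c ∈ (['A', 'U', 'T', 'C', 'G'] : List Char) then 1 else 0) := by
  by_cases h : c ∈ (['A', 'U', 'T', 'C', 'G'] : List Char)
  · simp only [List.mem_cons, List.not_mem_nil, or_false] at h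
    rcases h with h | h | h | h | h <;> subst h <;> simp [natCountSum, List.count_cons] <;> omega
  · have h1 : c ≠ 'A' := fun e => h (by simp [e])
    have h2 : c ≠ 'U' := fun e => h (by simp [e])
    have h3 : c ≠ 'T' := fun e => h (by simp [e])
    have h4 : c ≠ 'C' := fun e => h (by simp [e])
    have h5 : c ≠ 'G' := fun e => h (by simp [e])
    simp [natCountSum, List.count_cons, h, h1, h2, h3, h4, h5]

theorem natCountSum_le (l : List Char) : natCountSum l ≤ l.length := by
  induction l with
  | nil => simp [natCountSum]
  | cons c t ih =>
      rw [natCountSum_cons]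
      by_cases h : c ∈ (['A', 'U', 'T', 'C', 'G'] : List Char) <;> simp [h] <;> omega

theorem loop_eq_natCountSum (l : List Char) :
    isRegionValidLoop l = (if natCountSum l = l.length then 3 else 2) := by
  induction l with
  | nil => simp [isRegionValidLoop, natCountSum]
  | cons c t ih =>
      rw [isRegionValidLoop, ih, natCountSum_cons]
      by_cases h : c ∈ (['A', 'U', 'T', 'C', 'G'] : List Char)
      · simp only [h, not_true, if_false, if_pos]
        congr 1
        simp only [List.length_cons, eq_iff_iff]
        omega
      · have hle := natCountSum_le t
        have hcond : ¬ (natCountSum t + (if c ∈ (['A', 'U', 'T', 'C', 'G'] : List Char) then 1 else 0) = (c :: t).length) := by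
          simp [h]
          omega
        simp [h]
        omega

-- B's Int-valued count sum is the Nat sum
theorem countSum_eq_nat (seq : String) :
    isRegionValidCountSum seq = (natCountSum seq.toList : Int) := by
  unfold isRegionValidCountSum natCountSum
  simp only [PySem.Str.count_eq]
  have : ∀ c, (String.ofList [c]).toList = [c] := by intro c; simp
  simp only [this, chars_count_singleton]
  induction ("AUTCG".toList) with
  | nil => simp
  | cons c cs ih => simp [ih]

-- ===== VERDICT (by name: the statement is the Claim_ definition above) =====
theorem is_region_valid_spec : Claim_equal_is_region_valid := by
  intro seq _
  unfold Spec_is_region_valid is_region_valid is_region_valid_alt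
  rw [loop_eq_natCountSum, countSum_eq_nat]
  have hlen : PySem.Str.len seq = (seq.toList.length : Int) := by
    simp [PySem.Str.len_eq]
  rw [hlen]
  by_cases h : natCountSum seq.toList = seq.toList.length
  · simp [h]
  · have hni : ¬ ((natCountSum seq.toList : Int) = (seq.toList.length : Int)) := by
      intro he; exact h (by exact_mod_cast he)
    simp [h, hni]
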